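-- pv_equiv track=rewrite | github.com/SamirPaulb/DSAlgo | 02_Dynamic-Programming/09. DP on Grid/02. Maximum path sum in matrix.py | maximumPath
-- ===== SOURCE A (Python) =====
-- def maximumPath(N, Matrix):
--
--     # AS ALL MOVES IS [r+1] DOWNWARD => SO WE HAVE TO FILL matrix ROW WISE
--     # => in a row fill the whole row from right to left then go to the above row
--
--     res = 0
--
--     def get(i, j):  # to get value from Matrix, this if else can be used in loops also
--         if j > N-1 or j < 0: return 0
--         else: return Matrix[i][j]
--
--     if N == 1: return max(Matrix[0])  # For Matrix 1 single row NO Path available as all moves are downwards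
--
--     # Starting from (N-2) row, as in the bottom most row (N-1) NO Path available
--     for i in range(N-2, -1, -1):
--         for j in range(N-1, -1, -1):
--             Matrix[i][j] += max(
--                                 get(i+1, j),
--                                 get(i+1, j-1),
--                                 get(i+1, j+1)
--                                 )
--
--             res = max(res, Matrix[i][j])
--
--
--     return res
-- ===== SOURCE B (Python) =====
-- def maximumPath(N, Matrix):
--     # Top-down memoised recursion instead of A's bottom-up in-place loops.
--     # Equivalence is about the RETURN value: A mutates Matrix in place, B does not.
--     if N == 1:
--         return max(Matrix[0])
--     memo = {}
--
--     def f(i, j):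
--         key = (i, j)
--         if key in memo:
--             return memo[key]
--         if i == N - 1:
--             v = Matrix[i][j]
--         else:
--             down = f(i + 1, j)
--             left = f(i + 1, j - 1) if 0 <= j - 1 else 0
--             right = f(i + 1, j + 1) if j + 1 <= N - 1 else 0
--             v = Matrix[i][j] + max(down, left, right)
--         memo[key] = v
--         return v
--
--     res = 0
--     for i in range(N - 1):
--         for j in range(N):
--             res = max(res, f(i, j))
--     return res
-- ===== Notes on version B (the rewrite author's own statement) =====
-- stated objective: alternative
-- what changed: Replaces A's bottom-up in-place grid loops by a top-down memoised recursion f(i,j) over a dict, with the result taken as the max of f over the non-bottom cells in ascending order; B does not mutate Matrix.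
import Mathlib
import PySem

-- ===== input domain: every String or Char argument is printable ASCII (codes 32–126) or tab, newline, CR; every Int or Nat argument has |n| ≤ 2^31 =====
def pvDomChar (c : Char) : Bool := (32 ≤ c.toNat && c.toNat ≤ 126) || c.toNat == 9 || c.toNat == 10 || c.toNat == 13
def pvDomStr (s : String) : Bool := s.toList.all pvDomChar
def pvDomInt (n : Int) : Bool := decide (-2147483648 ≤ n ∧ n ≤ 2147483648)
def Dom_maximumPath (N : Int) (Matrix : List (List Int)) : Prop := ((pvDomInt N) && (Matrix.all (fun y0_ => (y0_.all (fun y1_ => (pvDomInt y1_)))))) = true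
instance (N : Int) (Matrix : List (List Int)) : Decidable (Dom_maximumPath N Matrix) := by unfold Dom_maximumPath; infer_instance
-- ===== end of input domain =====

-- B replaces A's bottom-up in-place DP loops by a top-down memoised recursion over a dict
-- (equivalence is about the RETURN value; A mutates Matrix in place, B does not).

-- ===== PORT A =====
-- A mutates Matrix in place; the port threads the matrix through the fold state.
-- pyGetD/pySetD are exact for the in-range accesses Pre_ guarantees (Python raises outside them).
def pvAget (N : Int) (M : List (List Int)) (i j : Int) : Int :=
  if j > N - 1 ∨ j < 0 then 0
  else PySem.List.pyGetD (PySem.List.pyGetD M i []) j 0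

def pvAstepInner (N i : Int) (st : List (List Int) × Int) (j : Int) : List (List Int) × Int :=
  let v := PySem.List.pyGetD (PySem.List.pyGetD st.1 i []) j 0 +
           max (pvAget N st.1 (i+1) j) (max (pvAget N st.1 (i+1) (j-1)) (pvAget N st.1 (i+1) (j+1)))
  (PySem.List.pySetD st.1 i (PySem.List.pySetD (PySem.List.pyGetD st.1 i []) j v), max st.2 v)

def pvAstep (N : Int) (st : List (List Int) × Int) (i : Int) : List (List Int) × Int :=
  (PySem.List.pyRange (N - 1) (-1) (-1)).foldl (pvAstepInner N i) st

def maximumPath (N : Int) (Matrix : List (List Int)) : Int :=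
  if N = 1 then ((PySem.List.max? (PySem.List.pyGetD Matrix 0 []) (fun y => y)).getD 0)
  else ((PySem.List.pyRange (N - 2) (-1) (-1)).foldl (pvAstep N) (Matrix, 0)).2

-- ===== PORT B =====
-- B's f(i, j): memo lookup, bottom row, else the three recursive calls in order.
-- The Nat fuel only makes the recursion total (the Python recursion terminates because i
-- increases towards N-1); maximumPath_alt supplies fuel N.toNat, which is never exhausted.
def pvF (N : Int) (Matrix : List (List Int)) :
    Nat → Int → Int → PySem.Dict (Int × Int) Int → Int × PySem.Dict (Int × Int) Int
  | fuel, i, j, memo =>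
    match memo.get? (i, j) with
    | some v => (v, memo)
    | none =>
      if i = N - 1 then
        let v := PySem.List.pyGetD (PySem.List.pyGetD Matrix i []) j 0
        (v, memo.insert (i, j) v)
      else
        match fuel with
        | 0 => (0, memo)
        | fuel' + 1 =>
          let d := pvF N Matrix fuel' (i + 1) j memo
          let l := if 0 ≤ j - 1 then pvF N Matrix fuel' (i + 1) (j - 1) d.2 else (0, d.2)
          let r := if j + 1 ≤ N - 1 then pvF N Matrix fuel' (i + 1) (j + 1) l.2 else (0, l.2)
          let v := PySem.List.pyGetD (PySem.List.pyGetD Matrix i []) j 0 + max d.1 (max l.1 r.1)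
          (v, r.2.insert (i, j) v)

def pvBinner (N : Int) (Matrix : List (List Int)) (i : Int)
    (st : Int × PySem.Dict (Int × Int) Int) (j : Int) : Int × PySem.Dict (Int × Int) Int :=
  let p := pvF N Matrix N.toNat i j st.2
  (max st.1 p.1, p.2)

def pvBouter (N : Int) (Matrix : List (List Int))
    (st : Int × PySem.Dict (Int × Int) Int) (i : Int) : Int × PySem.Dict (Int × Int) Int :=
  (PySem.List.pyRange 0 N 1).foldl (pvBinner N Matrix i) st

def maximumPath_alt (N : Int) (Matrix : List (List Int)) : Int :=
  if N = 1 then ((PySem.List.max? (PySem.List.pyGetD Matrix 0 []) (fun y => y)).getD 0)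
  else ((PySem.List.pyRange 0 (N - 1) 1).foldl (pvBouter N Matrix) (0, PySem.Dict.empty)).1

-- ===== PRECONDITION & SPEC =====
-- Pre_ excludes exactly the inputs where Python A raises: N = 1 with no rows or an empty first
-- row (IndexError / max of empty), and N ≥ 2 with fewer than N rows or a row among the first N
-- shorter than N (IndexError).
def Pre_maximumPath (N : Int) (Matrix : List (List Int)) : Prop :=
  (N = 1 → Matrix.headD [] ≠ []) ∧
  (2 ≤ N → N ≤ (Matrix.length : Int) ∧ ∀ row ∈ Matrix.take N.toNat, N ≤ (row.length : Int))
instance (N : Int) (Matrix : List (List Int)) : Decidable (Pre_maximumPath N Matrix) := by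
  unfold Pre_maximumPath; infer_instance

def pvWitness_maximumPath : Int × List (List Int) := (3, [[1, -2, 3], [4, 5, -6], [7, 8, 9]])

def Spec_maximumPath (N : Int) (Matrix : List (List Int)) (out : Int) : Prop := out = maximumPath_alt N Matrix
instance (N : Int) (Matrix : List (List Int)) (out : Int) : Decidable (Spec_maximumPath N Matrix out) := by unfold Spec_maximumPath; infer_instance

-- ===== CLAIM (what is proved, stated in full; the proofs are below) =====
def Claim_equal_maximumPath : Prop := ∀ (N : Int) (Matrix : List (List Int)), Dom_maximumPath N Matrix → Pre_maximumPath N Matrix → Spec_maximumPath N Matrix (maximumPath N Matrix)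

-- ===== LEMMAS AND PROOFS =====

-- The pure per-cell DP value: pvD N Matrix k j is the value A leaves in row N-1-k, column j
-- (for j in [0, N-1]); pvDP re-indexes it by the row number.
def pvD (N : Int) (Matrix : List (List Int)) : Nat → Int → Int
  | 0, j => PySem.List.pyGetD (PySem.List.pyGetD Matrix (N - 1) []) j 0
  | k + 1, j =>
      PySem.List.pyGetD (PySem.List.pyGetD Matrix (N - 2 - (k : Int)) []) j 0 +
      max (if 1 ≤ j then pvD N Matrix k (j - 1) else 0)
          (max (pvD N Matrix k j) (if j + 1 ≤ N - 1 then pvD N Matrix k (j + 1) else 0))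

def pvDP (N : Int) (Matrix : List (List Int)) (i j : Int) : Int := pvD N Matrix (N - 1 - i).toNat j

def pvBcell (N : Int) (Matrix : List (List Int)) (below : List Int) (i j : Int) : Int :=
  PySem.List.pyGetD (PySem.List.pyGetD Matrix i []) j 0 +
  max (if 1 ≤ j then PySem.List.pyGetD below (j - 1) 0 else 0)
      (max (PySem.List.pyGetD below j 0)
           (if j + 1 ≤ N - 1 then PySem.List.pyGetD below (j + 1) 0 else 0))

lemma pv_foldl_max_swap (l : List Int) : ∀ a x : Int, l.foldl max (max a x) = max (l.foldl max a) x := by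
  induction l with
  | nil => intro a x; rfl
  | cons y t ih =>
    intro a x
    simp only [List.foldl_cons]
    rw [max_right_comm a x y]
    exact ih (max a y) x

lemma pv_foldl_max_reverse (l : List Int) : ∀ a : Int, l.reverse.foldl max a = l.foldl max a := by
  induction l with
  | nil => intro a; rfl
  | cons y t ih =>
    intro a
    simp only [List.reverse_cons, List.foldl_append, List.foldl_cons, List.foldl_nil]
    rw [ih a, ← pv_foldl_max_swap]

lemma pv_pyGetD_pySetD_self {α : Type} (xs : List α) (i : Int) (v : α) (d : α)
    (h0 : 0 ≤ i) (hlen : i < (xs.length : Int)) :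
    PySem.List.pyGetD (PySem.List.pySetD xs i v) i d = v := by
  have hi : i = ((i.toNat : Nat) : Int) := (Int.toNat_of_nonneg h0).symm
  rw [hi, PySem.List.pyGetD_pySetD_natCast _ _ _ _ _ (by omega), if_pos rfl]

lemma pv_pyGetD_pySetD_ne {α : Type} (xs : List α) (i k : Int) (v : α) (d : α)
    (h0 : 0 ≤ i) (h0k : 0 ≤ k) (hlen : i < (xs.length : Int)) (hne : k ≠ i) :
    PySem.List.pyGetD (PySem.List.pySetD xs i v) k d = PySem.List.pyGetD xs k d := by
  have hi : i = ((i.toNat : Nat) : Int) := (Int.toNat_of_nonneg h0).symm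
  have hk : k = ((k.toNat : Nat) : Int) := (Int.toNat_of_nonneg h0k).symm
  rw [hi, hk, PySem.List.pyGetD_pySetD_natCast _ _ _ _ _ (by omega), if_neg (by omega)]

lemma pv_length_pySetD {α : Type} (xs : List α) (i : Int) (v : α) :
    (PySem.List.pySetD xs i v).length = xs.length := by
  simp [PySem.List.length_pySetD]

-- pvBcell is pvDP when below holds row i+1's DP values.
lemma pv_bcell_eq_DP (N : Int) (Matrix : List (List Int)) (below : List Int) (i j : Int)
    (hi : i ≤ N - 2) (hj0 : 0 ≤ j) (hjN : j ≤ N - 1)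
    (hbelow : ∀ t : Int, 0 ≤ t → t ≤ N - 1 → PySem.List.pyGetD below t 0 = pvDP N Matrix (i+1) t) :
    pvBcell N Matrix below i j = pvDP N Matrix i j := by
  have hk : (N - 1 - i).toNat = (N - 2 - i).toNat + 1 := by omega
  have hkc : ((N - 2 - i).toNat : Int) = N - 2 - i := by omega
  rw [pvBcell, pvDP, hk, pvD]
  rw [hkc, show N - 2 - (N - 2 - i) = i by ring]
  congr 1
  have hd : PySem.List.pyGetD below j 0 = pvD N Matrix (N - 2 - i).toNat j := by
    rw [hbelow j hj0 hjN, pvDP, show N - 1 - (i+1) = N - 2 - i by ring]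
  congr 1
  · by_cases h : 1 ≤ j
    · rw [if_pos h, if_pos h, hbelow (j-1) (by omega) (by omega), pvDP,
        show N - 1 - (i+1) = N - 2 - i by ring]
    · rw [if_neg h, if_neg h]
  · congr 1
    by_cases h : j + 1 ≤ N - 1
    · rw [if_pos h, if_pos h, hbelow (j+1) (by omega) h, pvDP,
        show N - 1 - (i+1) = N - 2 - i by ring]
    · rw [if_neg h, if_neg h]

-- Inner loop of A (columns j, j-1, …, 0 of row i): rows other than i are untouched, row i keeps
-- its length, columns ≤ j become the DP cells, columns > j are untouched, and the running max
-- folds the cell values.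
lemma pv_inner_spec (N : Int) (Matrix : List (List Int)) (below : List Int) (i : Int)
    (hi0 : 0 ≤ i) (hiN : i ≤ N - 2) (hlenM0 : N ≤ (Matrix.length : Int))
    (hrowi : N ≤ ((PySem.List.pyGetD Matrix i []).length : Int)) :
    ∀ (n : Nat) (j : Int) (M : List (List Int)) (res : Int),
      j = (n : Int) - 1 →
      j ≤ N - 1 →
      M.length = Matrix.length →
      (∀ k : Int, 0 ≤ k → (PySem.List.pyGetD M k []).length = (PySem.List.pyGetD Matrix k []).length) →
      (∀ t : Int, 0 ≤ t → t ≤ j → PySem.List.pyGetD (PySem.List.pyGetD M i []) t 0 = PySem.List.pyGetD (PySem.List.pyGetD Matrix i []) t 0) →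
      (∀ t : Int, 0 ≤ t → t ≤ N - 1 → PySem.List.pyGetD (PySem.List.pyGetD M (i+1) []) t 0 = PySem.List.pyGetD below t 0) →
      (∀ k : Int, 0 ≤ k → k ≠ i → PySem.List.pyGetD ((PySem.List.pyRange j (-1) (-1)).foldl (pvAstepInner N i) (M, res)).1 k [] = PySem.List.pyGetD M k []) ∧
      ((PySem.List.pyRange j (-1) (-1)).foldl (pvAstepInner N i) (M, res)).1.length = M.length ∧
      (PySem.List.pyGetD ((PySem.List.pyRange j (-1) (-1)).foldl (pvAstepInner N i) (M, res)).1 i []).length = (PySem.List.pyGetD M i []).length ∧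
      (∀ t : Int, 0 ≤ t → t ≤ j → PySem.List.pyGetD (PySem.List.pyGetD ((PySem.List.pyRange j (-1) (-1)).foldl (pvAstepInner N i) (M, res)).1 i []) t 0 = pvBcell N Matrix below i t) ∧
      (∀ t : Int, j < t → PySem.List.pyGetD (PySem.List.pyGetD ((PySem.List.pyRange j (-1) (-1)).foldl (pvAstepInner N i) (M, res)).1 i []) t 0 = PySem.List.pyGetD (PySem.List.pyGetD M i []) t 0) ∧
      ((PySem.List.pyRange j (-1) (-1)).foldl (pvAstepInner N i) (M, res)).2 = (PySem.List.pyRange j (-1) (-1)).foldl (fun a t => max a (pvBcell N Matrix below i t)) res := by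
  intro n
  induction n with
  | zero =>
    intro j M res hj _ _ _ _ _
    have : j = -1 := by omega
    subst this
    rw [PySem.List.pyRange_neg_one_eq_nil (by omega)]
    exact ⟨fun k _ _ => rfl, rfl, rfl,
      fun t ht1 ht2 => absurd (ht1.trans ht2) (by omega), fun t _ => rfl, rfl⟩
  | succ n ih =>
    intro j M res hj hjN hlen hrowlens hrow hbelow
    have hj0 : 0 ≤ j := by omega
    rw [PySem.List.pyRange_neg_one_cons (by omega)]
    simp only [List.foldl_cons]
    have hiltM : i < (M.length : Int) := by omega
    have hrowiM : N ≤ ((PySem.List.pyGetD M i []).length : Int) := by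
      rw [hrowlens i hi0]; exact hrowi
    set rowi := PySem.List.pyGetD M i [] with hrowidef
    set v := PySem.List.pyGetD rowi j 0 +
      max (pvAget N M (i+1) j) (max (pvAget N M (i+1) (j-1)) (pvAget N M (i+1) (j+1))) with hvdef
    have hstep : pvAstepInner N i (M, res) j =
        (PySem.List.pySetD M i (PySem.List.pySetD rowi j v), max res v) := rfl
    have hv : v = pvBcell N Matrix below i j := by
      rw [hvdef, pvBcell]
      have h1 : PySem.List.pyGetD rowi j 0 = PySem.List.pyGetD (PySem.List.pyGetD Matrix i []) j 0 :=
        hrow j hj0 (le_refl j)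
      have hgj : pvAget N M (i+1) j = PySem.List.pyGetD below j 0 := by
        rw [pvAget, if_neg (by omega)]; exact hbelow j hj0 (by omega)
      have hgl : pvAget N M (i+1) (j-1) = (if 1 ≤ j then PySem.List.pyGetD below (j-1) 0 else 0) := by
        by_cases h : 1 ≤ j
        · rw [pvAget, if_neg (by omega), if_pos h]; exact hbelow (j-1) (by omega) (by omega)
        · rw [pvAget, if_pos (by omega), if_neg h]
      have hgr : pvAget N M (i+1) (j+1) = (if j + 1 ≤ N - 1 then PySem.List.pyGetD below (j+1) 0 else 0) := by
        by_cases h : j + 1 ≤ N - 1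
        · rw [pvAget, if_neg (by omega), if_pos h]; exact hbelow (j+1) (by omega) h
        · rw [pvAget, if_pos (by omega), if_neg h]
      rw [h1, hgj, hgl, hgr, max_left_comm]
    set M' := PySem.List.pySetD M i (PySem.List.pySetD rowi j v) with hM'def
    have hlenM' : M'.length = Matrix.length := by
      rw [hM'def, pv_length_pySetD]; exact hlen
    have hrowM'i : PySem.List.pyGetD M' i [] = PySem.List.pySetD rowi j v := by
      rw [hM'def]; exact pv_pyGetD_pySetD_self _ _ _ _ hi0 (by omega)
    have hrowM'ne : ∀ k : Int, 0 ≤ k → k ≠ i → PySem.List.pyGetD M' k [] = PySem.List.pyGetD M k [] := by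
      intro k hk hkne
      rw [hM'def]; exact pv_pyGetD_pySetD_ne _ _ _ _ _ hi0 hk (by omega) hkne
    have hjlt : j < (rowi.length : Int) := by omega
    have hrowlens' : ∀ k : Int, 0 ≤ k → (PySem.List.pyGetD M' k []).length = (PySem.List.pyGetD Matrix k []).length := by
      intro k hk
      by_cases hkn : k = i
      · subst hkn; rw [hrowM'i, pv_length_pySetD]; exact hrowlens k hk
      · rw [hrowM'ne k hk hkn]; exact hrowlens k hk
    have hrow' : ∀ t : Int, 0 ≤ t → t ≤ j - 1 → PySem.List.pyGetD (PySem.List.pyGetD M' i []) t 0 = PySem.List.pyGetD (PySem.List.pyGetD Matrix i []) t 0 := by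
      intro t ht1 ht2
      rw [hrowM'i, pv_pyGetD_pySetD_ne _ _ _ _ _ hj0 ht1 hjlt (by omega)]
      exact hrow t ht1 (by omega)
    have hbelow' : ∀ t : Int, 0 ≤ t → t ≤ N - 1 → PySem.List.pyGetD (PySem.List.pyGetD M' (i+1) []) t 0 = PySem.List.pyGetD below t 0 := by
      intro t ht1 ht2
      rw [hrowM'ne (i+1) (by omega) (by omega)]
      exact hbelow t ht1 ht2
    obtain ⟨c1, c2, c3, c4, c5, c6⟩ :=
      ih (j-1) M' (max res v) (by omega) (by omega) hlenM' hrowlens' hrow' hbelow'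
    rw [hstep]
    refine ⟨?_, ?_, ?_, ?_, ?_, ?_⟩
    · intro k hk hkne
      rw [c1 k hk hkne]; exact hrowM'ne k hk hkne
    · rw [c2, hlenM', hlen]
    · rw [c3, hrowM'i, pv_length_pySetD]
    · intro t ht1 ht2
      by_cases ht : t ≤ j - 1
      · exact c4 t ht1 ht
      · have htj : t = j := by omega
        subst htj
        rw [c5 t (by omega), hrowM'i, pv_pyGetD_pySetD_self _ _ _ _ hj0 hjlt, hv]
    · intro t htj
      rw [c5 t (by omega), hrowM'i, pv_pyGetD_pySetD_ne _ _ _ _ _ hj0 (by omega) hjlt (by omega)]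
    · rw [c6, hv]

-- Outer loop of A: with row i+1 of the threaded matrix holding DP values, the running result is
-- the nested descending fold of max over the DP cell values.
lemma pv_outer_specA (N : Int) (Matrix : List (List Int))
    (hN : 2 ≤ N) (hlen0 : N ≤ (Matrix.length : Int))
    (hrows : ∀ k : Int, 0 ≤ k → k ≤ N - 1 → N ≤ ((PySem.List.pyGetD Matrix k []).length : Int)) :
    ∀ (n : Nat) (i : Int) (M : List (List Int)) (res : Int),
      i = (n : Int) - 1 →
      i ≤ N - 2 →
      M.length = Matrix.length →
      (∀ k : Int, 0 ≤ k → (PySem.List.pyGetD M k []).length = (PySem.List.pyGetD Matrix k []).length) →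
      (∀ k : Int, 0 ≤ k → k ≤ i → PySem.List.pyGetD M k [] = PySem.List.pyGetD Matrix k []) →
      (∀ t : Int, 0 ≤ t → t ≤ N - 1 → PySem.List.pyGetD (PySem.List.pyGetD M (i+1) []) t 0 = pvDP N Matrix (i+1) t) →
      ((PySem.List.pyRange i (-1) (-1)).foldl (pvAstep N) (M, res)).2 =
      (PySem.List.pyRange i (-1) (-1)).foldl
        (fun a ii => (PySem.List.pyRange (N-1) (-1) (-1)).foldl (fun b jj => max b (pvDP N Matrix ii jj)) a) res := by
  intro n
  induction n with
  | zero =>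
    intro i M res hi _ _ _ _ _
    have : i = -1 := by omega
    subst this
    rw [PySem.List.pyRange_neg_one_eq_nil (by omega)]
    rfl
  | succ n ih =>
    intro i M res hi hiN hlen hrowlens hpres hbelowDP
    have hi0 : 0 ≤ i := by omega
    rw [PySem.List.pyRange_neg_one_cons (by omega)]
    simp only [List.foldl_cons]
    set below : List Int := (PySem.List.pyRange 0 N 1).map (fun t => pvDP N Matrix (i+1) t) with hbseld
    have hbelget : ∀ t : Int, 0 ≤ t → t ≤ N - 1 → PySem.List.pyGetD below t 0 = pvDP N Matrix (i+1) t := by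
      intro t ht1 ht2
      rw [hbseld, PySem.List.pyGetD_map_pyRange_of_nonneg _ _ _ _ ht1 (by omega)]
    have hrow : ∀ t : Int, 0 ≤ t → t ≤ N - 1 →
        PySem.List.pyGetD (PySem.List.pyGetD M i []) t 0 = PySem.List.pyGetD (PySem.List.pyGetD Matrix i []) t 0 := by
      intro t _ _; rw [hpres i hi0 (le_refl i)]
    have hbelow : ∀ t : Int, 0 ≤ t → t ≤ N - 1 →
        PySem.List.pyGetD (PySem.List.pyGetD M (i+1) []) t 0 = PySem.List.pyGetD below t 0 := by
      intro t ht1 ht2; rw [hbelowDP t ht1 ht2, hbelget t ht1 ht2]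
    obtain ⟨c1, c2, c3, c4, _c5, c6⟩ :=
      pv_inner_spec N Matrix below i hi0 hiN hlen0 (hrows i hi0 (by omega)) N.toNat (N-1) M res
        (by omega) (by omega) hlen hrowlens hrow hbelow
    have hcellDP : ∀ t : Int, 0 ≤ t → t ≤ N - 1 → pvBcell N Matrix below i t = pvDP N Matrix i t := by
      intro t ht1 ht2
      exact pv_bcell_eq_DP N Matrix below i t hiN ht1 ht2 hbelget
    have hA1 : pvAstep N (M, res) i =
        (((PySem.List.pyRange (N-1) (-1) (-1)).foldl (pvAstepInner N i) (M, res)).1,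
         (PySem.List.pyRange (N-1) (-1) (-1)).foldl (fun b jj => max b (pvDP N Matrix i jj)) res) := by
      show (PySem.List.pyRange (N-1) (-1) (-1)).foldl (pvAstepInner N i) (M, res) = _
      refine Prod.ext rfl ?_
      rw [c6]
      apply PySem.List.foldl_congr_mem
      intro acc t ht
      rw [PySem.List.mem_pyRange_neg_one] at ht
      rw [hcellDP t (by omega) (by omega)]
    rw [hA1]
    apply ih (i-1) _ _ (by omega) (by omega)
    · rw [c2, hlen]
    · intro k hk
      by_cases hkn : k = i
      · subst hkn; rw [c3]; exact hrowlens k hk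
      · rw [c1 k hk hkn]; exact hrowlens k hk
    · intro k hk hki
      rw [c1 k hk (by omega)]; exact hpres k hk (by omega)
    · intro t ht1 ht2
      have hii : i - 1 + 1 = i := by omega
      rw [hii, c4 t ht1 ht2, hcellDP t ht1 ht2]

-- Inserting a correct value keeps the memo correct.
lemma pv_good_insert (N : Int) (Matrix : List (List Int)) (memo : PySem.Dict (Int × Int) Int)
    (i j v : Int) (hv : v = pvDP N Matrix i j)
    (hGood : ∀ i' j' v', memo.get? (i', j') = some v' → v' = pvDP N Matrix i' j') :
    ∀ i' j' v', (memo.insert (i, j) v).get? (i', j') = some v' → v' = pvDP N Matrix i' j' := by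
  intro i' j' v' h
  rw [PySem.Dict.get?_insert] at h
  by_cases hp : ((i', j') : Int × Int) = (i, j)
  · rw [if_pos hp] at h
    obtain ⟨h1, h2⟩ := Prod.ext_iff.mp hp
    have h3 := Option.some.inj h
    subst h3
    subst h1; subst h2
    exact hv
  · rw [if_neg hp] at h
    exact hGood i' j' v' h

-- B side: the memoised recursion computes the DP values and keeps the memo correct.
lemma pvF_spec (N : Int) (Matrix : List (List Int)) :
    ∀ (fuel : Nat) (i j : Int) (memo : PySem.Dict (Int × Int) Int),
      (∀ i' j' v, memo.get? (i', j') = some v → v = pvDP N Matrix i' j') →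
      i ≤ N - 1 → (N - 1 - i).toNat ≤ fuel →
      (pvF N Matrix fuel i j memo).1 = pvDP N Matrix i j ∧
      (∀ i' j' v, (pvF N Matrix fuel i j memo).2.get? (i', j') = some v → v = pvDP N Matrix i' j') := by
  intro fuel
  induction fuel with
  | zero =>
    intro i j memo hGood hiN hfuel
    have hieq : i = N - 1 := by omega
    have hDP0 : pvDP N Matrix i j = PySem.List.pyGetD (PySem.List.pyGetD Matrix i []) j 0 := by
      rw [pvDP, show (N - 1 - i).toNat = 0 by omega, pvD, hieq]
    cases hget : memo.get? (i, j) with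
    | some v =>
      rw [pvF, hget]
      exact ⟨hGood i j v hget, hGood⟩
    | none =>
      rw [pvF, hget]
      dsimp only
      rw [if_pos hieq]
      exact ⟨hDP0.symm, pv_good_insert N Matrix memo i j _ hDP0.symm hGood⟩
  | succ fuel ih =>
    intro i j memo hGood hiN hfuel
    cases hget : memo.get? (i, j) with
    | some v =>
      rw [pvF, hget]
      exact ⟨hGood i j v hget, hGood⟩
    | none =>
      rw [pvF, hget]
      dsimp only
      by_cases hieq : i = N - 1
      · rw [if_pos hieq]
        have hDP0 : pvDP N Matrix i j = PySem.List.pyGetD (PySem.List.pyGetD Matrix i []) j 0 := by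
          rw [pvDP, show (N - 1 - i).toNat = 0 by omega, pvD, hieq]
        exact ⟨hDP0.symm, pv_good_insert N Matrix memo i j _ hDP0.symm hGood⟩
      · rw [if_neg hieq]
        have hi1 : i + 1 ≤ N - 1 := by omega
        have hf1 : (N - 1 - (i + 1)).toNat ≤ fuel := by omega
        obtain ⟨hd1, hd2⟩ := ih (i + 1) j memo hGood hi1 hf1
        set dres := pvF N Matrix fuel (i + 1) j memo with hdres
        set lres := (if 0 ≤ j - 1 then pvF N Matrix fuel (i + 1) (j - 1) dres.2 else ((0 : Int), dres.2)) with hlres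
        set rres := (if j + 1 ≤ N - 1 then pvF N Matrix fuel (i + 1) (j + 1) lres.2 else ((0 : Int), lres.2)) with hrres
        have hl : lres.1 = (if 1 ≤ j then pvDP N Matrix (i+1) (j-1) else 0) ∧
            (∀ i' j' v, lres.2.get? (i', j') = some v → v = pvDP N Matrix i' j') := by
          rw [hlres]
          by_cases h : 0 ≤ j - 1
          · rw [if_pos h, if_pos (show (1:Int) ≤ j by omega)]
            exact ih (i + 1) (j - 1) dres.2 hd2 hi1 hf1
          · rw [if_neg h, if_neg (show ¬ (1:Int) ≤ j by omega)]
            exact ⟨rfl, hd2⟩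
        have hr : rres.1 = (if j + 1 ≤ N - 1 then pvDP N Matrix (i+1) (j+1) else 0) ∧
            (∀ i' j' v, rres.2.get? (i', j') = some v → v = pvDP N Matrix i' j') := by
          rw [hrres]
          by_cases h : j + 1 ≤ N - 1
          · rw [if_pos h, if_pos h]
            exact ih (i + 1) (j + 1) lres.2 hl.2 hi1 hf1
          · rw [if_neg h, if_neg h]
            exact ⟨rfl, hl.2⟩
        have hDPk : ∀ t : Int, pvDP N Matrix (i+1) t = pvD N Matrix (N - 2 - i).toNat t := by
          intro t; rw [pvDP, show (N - 1 - (i+1)).toNat = (N - 2 - i).toNat by omega]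
        have hval : PySem.List.pyGetD (PySem.List.pyGetD Matrix i []) j 0 +
            max dres.1 (max lres.1 rres.1) = pvDP N Matrix i j := by
          rw [hd1, hl.1, hr.1]
          simp only [hDPk]
          rw [max_left_comm]
          rw [pvDP, show (N - 1 - i).toNat = (N - 2 - i).toNat + 1 by omega]
          simp only [pvD]
          rw [show (((N - 2 - i).toNat : Nat) : Int) = N - 2 - i by omega,
            show N - 2 - (N - 2 - i) = i by ring]
        exact ⟨hval, pv_good_insert N Matrix rres.2 i j _ hval hr.2⟩

-- B's inner loop over j.
lemma pvB_inner (N : Int) (Matrix : List (List Int)) (i : Int)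
    (hi0 : 0 ≤ i) (hiN : i ≤ N - 1) :
    ∀ (lj : List Int) (st : Int × PySem.Dict (Int × Int) Int),
      (∀ i' j' v, st.2.get? (i', j') = some v → v = pvDP N Matrix i' j') →
      (lj.foldl (pvBinner N Matrix i) st).1 = lj.foldl (fun a j => max a (pvDP N Matrix i j)) st.1 ∧
      (∀ i' j' v, (lj.foldl (pvBinner N Matrix i) st).2.get? (i', j') = some v → v = pvDP N Matrix i' j') := by
  intro lj
  induction lj with
  | nil => intro st hGood; exact ⟨rfl, hGood⟩
  | cons j t ihj =>
    intro st hGood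
    simp only [List.foldl_cons]
    obtain ⟨h1, h2⟩ := pvF_spec N Matrix N.toNat i j st.2 hGood hiN (by omega)
    have hstep : pvBinner N Matrix i st j =
        (max st.1 (pvDP N Matrix i j), (pvF N Matrix N.toNat i j st.2).2) := by
      rw [pvBinner, h1]
    rw [hstep]
    exact ihj _ h2

-- B's outer loop over i.
lemma pvB_outer (N : Int) (Matrix : List (List Int)) :
    ∀ (li : List Int) (st : Int × PySem.Dict (Int × Int) Int),
      (∀ i' j' v, st.2.get? (i', j') = some v → v = pvDP N Matrix i' j') →
      (∀ i ∈ li, 0 ≤ i ∧ i ≤ N - 1) →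
      (li.foldl (pvBouter N Matrix) st).1 =
      li.foldl (fun a i => (PySem.List.pyRange 0 N 1).foldl (fun b j => max b (pvDP N Matrix i j)) a) st.1 := by
  intro li
  induction li with
  | nil => intro st _ _; rfl
  | cons i t ihi =>
    intro st hGood hmem
    simp only [List.foldl_cons]
    have hb := hmem i (List.mem_cons_self ..)
    have hmemrest : ∀ x ∈ t, 0 ≤ x ∧ x ≤ N - 1 := fun x hx => hmem x (List.mem_cons_of_mem _ hx)
    obtain ⟨h1, h2⟩ := pvB_inner N Matrix i hb.1 hb.2 (PySem.List.pyRange 0 N 1) st hGood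
    have hstep : pvBouter N Matrix st i =
        ((PySem.List.pyRange 0 N 1).foldl (fun a j => max a (pvDP N Matrix i j)) st.1,
         ((PySem.List.pyRange 0 N 1).foldl (pvBinner N Matrix i) st).2) := by
      rw [pvBouter]
      exact Prod.ext h1 rfl
    rw [hstep]
    exact ihi _ h2 hmemrest

-- A nested max-fold is a flat max-fold over the flattened cell list.
lemma pv_nested_eq_flat (h : Int → Int → Int) :
    ∀ (li : List Int) (g : Int → List Int) (a : Int),
      li.foldl (fun a i => (g i).foldl (fun b j => max b (h i j)) a) a =
      (li.flatMap (fun i => (g i).map (h i))).foldl max a := by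
  intro li
  induction li with
  | nil => intro g a; rfl
  | cons i t ihi =>
    intro g a
    simp only [List.foldl_cons, List.flatMap_cons, List.foldl_append]
    rw [← ihi g]
    congr 1
    rw [List.foldl_map]

-- ===== VERDICT (by name: the statement is the Claim_ definition above) =====
theorem maximumPath_spec : Claim_equal_maximumPath := by
  intro N Matrix _hdom hpre
  unfold Spec_maximumPath
  by_cases h1 : N = 1
  · subst h1; rfl
  · by_cases h2 : 2 ≤ N
    · unfold maximumPath maximumPath_alt
      rw [if_neg h1, if_neg h1]
      obtain ⟨_, hp⟩ := hpre
      obtain ⟨hlen0, hrowsT⟩ := hp h2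
      have hrows : ∀ k : Int, 0 ≤ k → k ≤ N - 1 → N ≤ ((PySem.List.pyGetD Matrix k []).length : Int) := by
        intro k hk hkN
        have hklt : k.toNat < Matrix.length := by omega
        rw [PySem.List.pyGetD_eq_getElem _ _ hk (by omega)]
        apply hrowsT
        have hkn : k.toNat < N.toNat := by omega
        have : Matrix[k.toNat] = (Matrix.take N.toNat)[k.toNat]'(by
          rw [List.length_take]; omega) := by
          rw [List.getElem_take]
        rw [this]
        exact List.getElem_mem _
      -- A side: nested descending fold of DP values
      have hA : ((PySem.List.pyRange (N - 2) (-1) (-1)).foldl (pvAstep N) (Matrix, 0)).2 =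
          (PySem.List.pyRange (N-2) (-1) (-1)).foldl
            (fun a ii => (PySem.List.pyRange (N-1) (-1) (-1)).foldl (fun b jj => max b (pvDP N Matrix ii jj)) a) 0 := by
        apply pv_outer_specA N Matrix h2 hlen0 hrows (N-1).toNat (N-2) Matrix 0 (by omega) (by omega)
          rfl (fun k _ => rfl) (fun k _ _ => rfl)
        intro t ht1 ht2
        rw [show N - 2 + 1 = N - 1 by ring, pvDP, show (N - 1 - (N - 1)).toNat = 0 by omega, pvD]
      -- B side: nested ascending fold of DP values
      have hB : ((PySem.List.pyRange 0 (N - 1) 1).foldl (pvBouter N Matrix) (0, PySem.Dict.empty)).1 =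
          (PySem.List.pyRange 0 (N-1) 1).foldl
            (fun a i => (PySem.List.pyRange 0 N 1).foldl (fun b j => max b (pvDP N Matrix i j)) a) 0 := by
        apply pvB_outer N Matrix (PySem.List.pyRange 0 (N-1) 1) (0, PySem.Dict.empty)
        · intro i' j' v hv
          simp [PySem.Dict.get?_empty] at hv
        · intro i hi
          rw [PySem.List.mem_pyRange_one] at hi
          omega
      rw [hA, hB]
      rw [pv_nested_eq_flat, pv_nested_eq_flat]
      rw [PySem.List.pyRange_neg_one_eq_reverse, PySem.List.pyRange_neg_one_eq_reverse]
      rw [show (-1 : Int) + 1 = 0 by ring, show N - 2 + 1 = N - 1 by ring, show N - 1 + 1 = N by ring]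
      simp only [List.map_reverse]
      rw [List.flatMap_reverse]
      simp only [Function.comp_def, List.reverse_reverse]
      rw [pv_foldl_max_reverse]
    · unfold maximumPath maximumPath_alt
      rw [if_neg h1, if_neg h1]
      rw [PySem.List.pyRange_neg_one_eq_nil (by omega), PySem.List.pyRange_one_eq_nil (by omega)]
      rfl
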